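-- pv_equiv track=rewrite | github.com/gongyu0918-debug/rogue-goai | server.py | _get_corner_boundary_points
-- ===== SOURCE A (Python) =====
-- def _get_corner_square_points(size: int, corner: int, span: int) -> list[tuple[int, int]]:
--     pts = []
--     for dy in range(span):
--         for dx in range(span):
--             if corner == 0:
--                 pts.append((dx, dy))
--             elif corner == 1:
--                 pts.append((size - span + dx, dy))
--             elif corner == 2:
--                 pts.append((dx, size - span + dy))
--             else:
--                 pts.append((size - span + dx, size - span + dy))
--     return pts
--
-- def _get_corner_boundary_points(size: int, corner: int, span: int) -> list[tuple[int, int]]: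
--     pts = []
--     for x, y in _get_corner_square_points(size, corner, span):
--         min_x = 0 if corner in (0, 2) else size - span
--         max_x = span - 1 if corner in (0, 2) else size - 1
--         min_y = 0 if corner in (0, 1) else size - span
--         max_y = span - 1 if corner in (0, 1) else size - 1
--         if x in (min_x, max_x) or y in (min_y, max_y):
--             pts.append((x, y))
--     return pts
-- ===== SOURCE B (Python) =====
-- def _get_corner_boundary_points(size: int, corner: int, span: int) -> list[tuple[int, int]]:
--     # Emit the boundary directly: full first row, two endpoints per interior row, full last row.
--     ox = 0 if corner in (0, 2) else size - span
--     oy = 0 if corner in (0, 1) else size - span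
--     if span <= 0:
--         return []
--     if span == 1:
--         return [(ox, oy)]
--     top = [(ox + dx, oy) for dx in range(span)]
--     mid = [p for dy in range(1, span - 1) for p in ((ox, oy + dy), (ox + span - 1, oy + dy))]
--     bot = [(ox + dx, oy + span - 1) for dx in range(span)]
--     return top + mid + bot
-- ===== Notes on version B (the rewrite author's own statement) =====
-- stated objective: faster
-- what changed: B constructs the boundary directly (full first/last rows plus two endpoints per interior row, in row-major order) instead of generating all span*span square points and filtering them.
import Mathlib
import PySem

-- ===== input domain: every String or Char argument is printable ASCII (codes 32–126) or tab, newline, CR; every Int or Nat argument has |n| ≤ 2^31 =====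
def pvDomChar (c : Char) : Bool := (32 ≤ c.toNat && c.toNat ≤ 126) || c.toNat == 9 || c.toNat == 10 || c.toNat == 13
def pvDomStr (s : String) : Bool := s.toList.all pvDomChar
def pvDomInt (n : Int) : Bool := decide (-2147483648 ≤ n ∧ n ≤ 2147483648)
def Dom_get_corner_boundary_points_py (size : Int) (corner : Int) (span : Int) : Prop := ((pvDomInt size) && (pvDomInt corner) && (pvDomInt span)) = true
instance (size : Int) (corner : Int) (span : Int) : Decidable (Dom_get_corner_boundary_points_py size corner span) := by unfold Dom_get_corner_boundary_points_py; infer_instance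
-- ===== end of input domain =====

-- B emits the boundary directly (full first/last rows plus two endpoints per interior row, row-major) instead of filtering the full span×span square: O(span) vs O(span²).

-- ===== PORT A =====
def pvSquarePoints (size : Int) (corner : Int) (span : Int) : List (Int × Int) :=
  (PySem.List.pyRange 0 span 1).foldl (fun pts dy =>
    (PySem.List.pyRange 0 span 1).foldl (fun pts dx =>
      if corner = 0 then pts ++ [(dx, dy)]
      else if corner = 1 then pts ++ [(size - span + dx, dy)]
      else if corner = 2 then pts ++ [(dx, size - span + dy)]
      else pts ++ [(size - span + dx, size - span + dy)]) pts) []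

def get_corner_boundary_points_py (size : Int) (corner : Int) (span : Int) : List (Int × Int) :=
  (pvSquarePoints size corner span).foldl (fun pts p =>
    let x := p.1
    let y := p.2
    let min_x : Int := if corner = 0 ∨ corner = 2 then 0 else size - span
    let max_x : Int := if corner = 0 ∨ corner = 2 then span - 1 else size - 1
    let min_y : Int := if corner = 0 ∨ corner = 1 then 0 else size - span
    let max_y : Int := if corner = 0 ∨ corner = 1 then span - 1 else size - 1
    if x = min_x ∨ x = max_x ∨ y = min_y ∨ y = max_y then pts ++ [(x, y)] else pts) []

-- ===== PORT B =====
def get_corner_boundary_points_py_alt (size : Int) (corner : Int) (span : Int) : List (Int × Int) :=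
  let ox : Int := if corner = 0 ∨ corner = 2 then 0 else size - span
  let oy : Int := if corner = 0 ∨ corner = 1 then 0 else size - span
  if span ≤ 0 then []
  else if span = 1 then [(ox, oy)]
  else
    ((PySem.List.pyRange 0 span 1).map (fun dx => (ox + dx, oy))) ++
    ((PySem.List.pyRange 1 (span - 1) 1).flatMap (fun dy => [(ox, oy + dy), (ox + span - 1, oy + dy)])) ++
    ((PySem.List.pyRange 0 span 1).map (fun dx => (ox + dx, oy + span - 1)))

-- ===== PRECONDITION & SPEC =====
def Spec_get_corner_boundary_points_py (size : Int) (corner : Int) (span : Int) (out : List (Int × Int)) : Prop := out = get_corner_boundary_points_py_alt size corner span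
instance (size : Int) (corner : Int) (span : Int) (out : List (Int × Int)) : Decidable (Spec_get_corner_boundary_points_py size corner span out) := by unfold Spec_get_corner_boundary_points_py; infer_instance

-- ===== CLAIM (what is proved, stated in full; the proofs are below) =====
def Claim_equal_get_corner_boundary_points_py : Prop := ∀ (size : Int) (corner : Int) (span : Int), Dom_get_corner_boundary_points_py size corner span → Spec_get_corner_boundary_points_py size corner span (get_corner_boundary_points_py size corner span)

-- ===== LEMMAS AND PROOFS =====

theorem pv_flatten_map {α β : Type} (l : List α) (f : α → β) :
    (List.map (fun x => [f x]) l).flatten = List.map f l := by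
  induction l with
  | nil => rfl
  | cons a t ih => simp [ih]

theorem pv_flatMap_congr {α β : Type} (l : List α) (f g : α → List β)
    (h : ∀ x ∈ l, f x = g x) : l.flatMap f = l.flatMap g := by
  induction l with
  | nil => rfl
  | cons a t ih => simp_all [List.flatMap_cons]

-- The square is rows of offset points, uniformly in the corner.
theorem pvSquarePoints_eq (size corner span : Int) :
    pvSquarePoints size corner span =
      (PySem.List.pyRange 0 span 1).flatMap (fun dy =>
        (PySem.List.pyRange 0 span 1).map (fun dx =>
          ((if corner = 0 ∨ corner = 2 then 0 else size - span) + dx,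
           (if corner = 0 ∨ corner = 1 then 0 else size - span) + dy))) := by
  have hbody : ∀ (acc : List (Int × Int)), ∀ dy ∈ PySem.List.pyRange 0 span 1,
      (PySem.List.pyRange 0 span 1).foldl (fun pts dx =>
        if corner = 0 then pts ++ [(dx, dy)]
        else if corner = 1 then pts ++ [(size - span + dx, dy)]
        else if corner = 2 then pts ++ [(dx, size - span + dy)]
        else pts ++ [(size - span + dx, size - span + dy)]) acc
      = acc ++ (PySem.List.pyRange 0 span 1).map (fun dx =>
          ((if corner = 0 ∨ corner = 2 then 0 else size - span) + dx,
           (if corner = 0 ∨ corner = 1 then 0 else size - span) + dy)) := by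
    intro acc dy _
    by_cases h0 : corner = 0
    · simp [h0, pv_flatten_map]
    · by_cases h1 : corner = 1
      · simp [h1, pv_flatten_map]
      · by_cases h2 : corner = 2
        · simp [h2, pv_flatten_map]
        · simp [h0, h1, h2, pv_flatten_map]
  unfold pvSquarePoints
  rw [PySem.List.foldl_congr_mem _ _ _ _ hbody, PySem.List.foldl_append_eq_flatMap]
  simp

-- A is the filter of the square by the boundary test, which reduces to dx/dy being extremal.
theorem portA_eq_filter (size corner span : Int) :
    get_corner_boundary_points_py size corner span =
      (PySem.List.pyRange 0 span 1).flatMap (fun dy =>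
        ((PySem.List.pyRange 0 span 1).filter (fun dx =>
            decide (dx = 0 ∨ dx = span - 1 ∨ dy = 0 ∨ dy = span - 1))).map (fun dx =>
          ((if corner = 0 ∨ corner = 2 then 0 else size - span) + dx,
           (if corner = 0 ∨ corner = 1 then 0 else size - span) + dy))) := by
  unfold get_corner_boundary_points_py
  rw [show (fun (pts : List (Int × Int)) (p : Int × Int) =>
      let x := p.1
      let y := p.2
      let min_x : Int := if corner = 0 ∨ corner = 2 then 0 else size - span
      let max_x : Int := if corner = 0 ∨ corner = 2 then span - 1 else size - 1
      let min_y : Int := if corner = 0 ∨ corner = 1 then 0 else size - span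
      let max_y : Int := if corner = 0 ∨ corner = 1 then span - 1 else size - 1
      if x = min_x ∨ x = max_x ∨ y = min_y ∨ y = max_y then pts ++ [(x, y)] else pts)
    = (fun pts p =>
      if (p.1 = (if corner = 0 ∨ corner = 2 then 0 else size - span)
            ∨ p.1 = (if corner = 0 ∨ corner = 2 then span - 1 else size - 1)
            ∨ p.2 = (if corner = 0 ∨ corner = 1 then 0 else size - span)
            ∨ p.2 = (if corner = 0 ∨ corner = 1 then span - 1 else size - 1))
      then pts ++ [p] else pts) from rfl]
  rw [PySem.List.foldl_append_ite_eq_filter, pvSquarePoints_eq, List.filter_flatMap]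
  simp only [List.nil_append]
  refine congrArg (fun f => List.flatMap f (PySem.List.pyRange 0 span 1)) (funext fun dy => ?_)
  rw [List.filter_map]
  refine congrArg (List.map _) (List.filter_congr fun dx _ => ?_)
  simp only [Function.comp, decide_eq_decide]
  by_cases hx : corner = 0 ∨ corner = 2 <;> by_cases hy : corner = 0 ∨ corner = 1 <;>
    simp [hx, hy] <;> omega

theorem pv_main (size corner span : Int) :
    get_corner_boundary_points_py size corner span = get_corner_boundary_points_py_alt size corner span := by
  rw [portA_eq_filter]
  by_cases hle : span ≤ 0
  · simp [get_corner_boundary_points_py_alt, hle, PySem.List.pyRange_one_eq_nil hle]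
  · by_cases h1 : span = 1
    · subst h1
      have hr : PySem.List.pyRange 0 1 1 = [0] := by decide
      simp [get_corner_boundary_points_py_alt, hr]
    · -- span ≥ 2
      have h2 : 2 ≤ span := by omega
      have h01 : PySem.List.pyRange 1 span 1
          = PySem.List.pyRange 1 (span - 1) 1 ++ [span - 1] := by
        rw [PySem.List.pyRange_one_append 1 (span - 1) span (by omega) (by omega)]
        congr 1
        rw [PySem.List.pyRange_one_cons (by omega : span - 1 < span),
            show span - 1 + 1 = span by ring,
            PySem.List.pyRange_one_eq_nil (le_refl span)]
      have hdec : PySem.List.pyRange 0 span 1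
          = 0 :: (PySem.List.pyRange 1 (span - 1) 1 ++ [span - 1]) := by
        rw [PySem.List.pyRange_one_cons (by omega : (0:Int) < span),
            show (0:Int) + 1 = 1 by norm_num, h01]
      have hfil : ∀ dy ∈ PySem.List.pyRange 1 (span - 1) 1,
          ((0 : Int) :: (PySem.List.pyRange 1 (span - 1) 1 ++ [span - 1])).filter (fun dx =>
            decide (dx = 0 ∨ dx = span - 1 ∨ dy = 0 ∨ dy = span - 1)) = [0, span - 1] := by
        intro dy hdy
        have hd := PySem.List.mem_pyRange_one.mp hdy
        rw [List.filter_cons, List.filter_append]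
        have hmidnil : (PySem.List.pyRange 1 (span - 1) 1).filter (fun dx =>
            decide (dx = 0 ∨ dx = span - 1 ∨ dy = 0 ∨ dy = span - 1)) = [] := by
          rw [List.filter_eq_nil_iff]
          intro dx hdx
          have := PySem.List.mem_pyRange_one.mp hdx
          simp only [decide_eq_true_eq]
          omega
        rw [hmidnil]
        simp
      simp only [get_corner_boundary_points_py_alt]
      rw [if_neg hle, if_neg h1, hdec]
      simp only [List.flatMap_cons, List.flatMap_append, List.flatMap_nil, List.append_nil]
      rw [pv_flatMap_congr _ _ (fun dy => List.map (fun dx =>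
            ((if corner = 0 ∨ corner = 2 then 0 else size - span) + dx,
             (if corner = 0 ∨ corner = 1 then 0 else size - span) + dy)) [0, span - 1])
          (fun dy hdy => by rw [hfil dy hdy])]
      simp [add_sub_assoc, List.append_assoc]

-- ===== VERDICT (by name: the statement is the Claim_ definition above) =====
theorem get_corner_boundary_points_py_spec : Claim_equal_get_corner_boundary_points_py := by
  intro size corner span _
  exact pv_main size corner span
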